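-- pv_equiv track=rewrite | github.com/adithya1012/LeetCode | test.py | getQueryResults
-- ===== SOURCE A (Python) =====
-- from collections import deque
--
-- def getQueryResults(engagementScores, query):
--     n = len(engagementScores)
--     d = deque(engagementScores)
--     simulation = []
--     for _ in range(n - 1):
--         a = d.popleft()
--         b = d.popleft()
--         if a >= b:
--             d.appendleft(a)
--             d.append(b)
--         else:
--             d.appendleft(b)
--             d.append(a)
--         simulation.append([d[0], d[1]])
--     max_elem = d[0]
--     cycle = list(d)[1:]
--     cycle_len = len(cycle)
--     res = []
--     for op in query:
--         if op <= n - 1: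
--             # For queries within the simulation range, use the recorded result.
--             res.append(simulation[op - 1])
--         else:
--             # For queries beyond n-1 operations, use the cyclic behavior.
--             t = op - (n - 1)
--             res.append([max_elem, cycle[t % cycle_len]])
--     return res
-- ===== SOURCE B (Python) =====
-- def getQueryResults(engagementScores, query):
--     # One pass with a running champion instead of a deque simulation.
--     n = len(engagementScores)
--     champ = engagementScores[0]
--     champs = []
--     losers = []
--     for x in engagementScores[1:]:
--         if x > champ:
--             losers.append(champ)
--             champ = x
--         else:
--             losers.append(x)
--         champs.append(champ)
--     seconds = engagementScores[2:] + losers[:1]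
--     simulation = [[c, s] for c, s in zip(champs, seconds)]
--     res = []
--     for op in query:
--         if op <= n - 1:
--             res.append(simulation[op - 1])
--         else:
--             res.append([champ, losers[(op - (n - 1)) % len(losers)]])
--     return res
-- ===== Notes on version B (the rewrite author's own statement) =====
-- stated objective: simpler
-- what changed: Replaces the deque simulation (pop two, reinsert winner in front and loser at the back each round) by a single pass that tracks a running champion and collects losers in order, building the per-round records by zipping the running champions with the upcoming scores plus the first loser.
import Mathlib
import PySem

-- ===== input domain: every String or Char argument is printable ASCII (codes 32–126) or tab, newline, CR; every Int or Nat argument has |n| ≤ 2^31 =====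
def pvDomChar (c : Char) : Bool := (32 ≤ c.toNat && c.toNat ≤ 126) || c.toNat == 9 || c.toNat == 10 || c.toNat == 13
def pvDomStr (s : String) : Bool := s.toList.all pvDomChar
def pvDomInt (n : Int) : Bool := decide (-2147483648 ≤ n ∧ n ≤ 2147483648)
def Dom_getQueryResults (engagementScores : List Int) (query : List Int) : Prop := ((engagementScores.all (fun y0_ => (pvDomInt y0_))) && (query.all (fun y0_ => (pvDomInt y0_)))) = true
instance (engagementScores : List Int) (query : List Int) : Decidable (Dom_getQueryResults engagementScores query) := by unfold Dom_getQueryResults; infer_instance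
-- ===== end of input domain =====

-- B replaces A's deque simulation by one pass with a running champion and a losers list (objective: simpler).

-- ===== PORT A =====
-- one loop iteration: pop a, b; winner to the front, loser to the back; record [d[0], d[1]]
def pvAStep (d : List Int) (sim : List (List Int)) : List Int × List (List Int) :=
  match d with
  | a :: b :: rest =>
    let d' := if a ≥ b then a :: (rest ++ [b]) else b :: (rest ++ [a])
    (d', sim ++ [[(PySem.List.pyGet? d' 0).getD 0, (PySem.List.pyGet? d' 1).getD 0]])
  | _ => (d, sim)  -- unreachable inside Pre_: the deque always has ≥ 2 elements during the loop

-- for _ in range(n - 1): the loop body, (n-1).toNat times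
def pvALoop : Nat → List Int × List (List Int) → List Int × List (List Int)
  | 0, st => st
  | k + 1, st => pvALoop k (pvAStep st.1 st.2)

def getQueryResults (engagementScores : List Int) (query : List Int) : List (List Int) :=
  let n : Int := engagementScores.length
  let st := pvALoop (n - 1).toNat (engagementScores, [])
  let d := st.1
  let simulation := st.2
  let maxElem := (PySem.List.pyGet? d 0).getD 0
  let cycle := PySem.List.slice d (some 1) none
  let cycleLen : Int := cycle.length
  query.foldl (fun res op =>
    if op ≤ n - 1 then
      res ++ [(PySem.List.pyGet? simulation (op - 1)).getD []]
    else
      res ++ [[maxElem, (PySem.List.pyGet? cycle (PySem.Int.mod (op - (n - 1)) cycleLen)).getD 0]]) []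

-- ===== PORT B =====
-- one pass: running champion, losers appended in order, champions after each round
def pvBStep (st : Int × List Int × List Int) (x : Int) : Int × List Int × List Int :=
  if x > st.1 then (x, st.2.1 ++ [st.1], st.2.2 ++ [x]) else (st.1, st.2.1 ++ [x], st.2.2 ++ [st.1])

def getQueryResults_alt (engagementScores : List Int) (query : List Int) : List (List Int) :=
  let n : Int := engagementScores.length
  let champ0 := (PySem.List.pyGet? engagementScores 0).getD 0
  let st := (PySem.List.slice engagementScores (some 1) none).foldl pvBStep (champ0, [], [])
  let champ := st.1
  let losers := st.2.1
  let champs := st.2.2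
  let seconds := PySem.List.slice engagementScores (some 2) none ++ PySem.List.slice losers none (some 1)
  let simulation := List.zipWith (fun c s => [c, s]) champs seconds
  query.foldl (fun res op =>
    if op ≤ n - 1 then
      res ++ [(PySem.List.pyGet? simulation (op - 1)).getD []]
    else
      res ++ [[champ, (PySem.List.pyGet? losers (PySem.Int.mod (op - (n - 1)) (losers.length : Int))).getD 0]]) []

-- ===== PRECONDITION & SPEC =====
-- Pre_ excludes exactly the inputs on which the Python A raises: the empty score list (IndexError on d[0]),
-- queries op ≤ n-1 with op-1 below -(n-1) (IndexError), and queries op > n-1 when n = 1 (ZeroDivisionError).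
def Pre_getQueryResults (engagementScores : List Int) (query : List Int) : Prop :=
  engagementScores ≠ [] ∧
  ∀ op ∈ query,
    (op ≤ (engagementScores.length : Int) - 1 → 2 - (engagementScores.length : Int) ≤ op) ∧
    ((engagementScores.length : Int) - 1 < op → 2 ≤ engagementScores.length)
instance (engagementScores : List Int) (query : List Int) : Decidable (Pre_getQueryResults engagementScores query) := by
  unfold Pre_getQueryResults; infer_instance
def pvWitness_getQueryResults : List Int × List Int := ([3, 1, 2], [1, 2, 3, 4])

def Spec_getQueryResults (engagementScores : List Int) (query : List Int) (out : List (List Int)) : Prop := out = getQueryResults_alt engagementScores query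
instance (engagementScores : List Int) (query : List Int) (out : List (List Int)) : Decidable (Spec_getQueryResults engagementScores query out) := by unfold Spec_getQueryResults; infer_instance

-- ===== CLAIM (what is proved, stated in full; the proofs are below) =====
def Claim_equal_getQueryResults : Prop := ∀ (engagementScores : List Int) (query : List Int), Dom_getQueryResults engagementScores query → Pre_getQueryResults engagementScores query → Spec_getQueryResults engagementScores query (getQueryResults engagementScores query)

-- ===== LEMMAS AND PROOFS =====

-- functional descriptions of B's single pass
def pvChamp : Int → List Int → Int
  | c, [] => c
  | c, x :: r => pvChamp (if x > c then x else c) r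

def pvLosers : Int → List Int → List Int
  | _, [] => []
  | c, x :: r => (if x > c then c else x) :: pvLosers (if x > c then x else c) r

def pvChamps : Int → List Int → List Int
  | _, [] => []
  | c, x :: r => (if x > c then x else c) :: pvChamps (if x > c then x else c) r

theorem pvBStep_fold (r : List Int) : ∀ (c : Int) (L Cs : List Int),
    r.foldl pvBStep (c, L, Cs) = (pvChamp c r, L ++ pvLosers c r, Cs ++ pvChamps c r) := by
  induction r with
  | nil => intro c L Cs; simp [pvChamp, pvLosers, pvChamps]
  | cons x r ih =>
    intro c L Cs
    simp only [List.foldl_cons, pvBStep, pvChamp, pvLosers, pvChamps]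
    by_cases h : x > c <;> simp [h, ih]

theorem pvChamps_length (r : List Int) : ∀ c, (pvChamps c r).length = r.length := by
  induction r with
  | nil => intro c; rfl
  | cons x r ih => intro c; simp [pvChamps, ih]

theorem pvLosers_length (r : List Int) : ∀ c, (pvLosers c r).length = r.length := by
  induction r with
  | nil => intro c; rfl
  | cons x r ih => intro c; simp [pvLosers, ih]

theorem pg0 (x : Int) (t : List Int) : (PySem.List.pyGet? (x :: t) 0).getD 0 = x := by
  simp [pysem]

theorem pg1 (x y : Int) (t : List Int) : (PySem.List.pyGet? (x :: y :: t) 1).getD 0 = y := by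
  simp [pysem]

-- one round of A's loop, with the recorded entry [d[0], d[1]] computed out
theorem pvAStep_cons (a b : Int) (rest : List Int) (S : List (List Int)) :
    pvAStep (a :: b :: rest) S =
      (if a ≥ b then (a :: (rest ++ [b]), S ++ [[a, (rest ++ [b]).headD 0]])
       else (b :: (rest ++ [a]), S ++ [[b, (rest ++ [a]).headD 0]])) := by
  have e1 : pvAStep (a :: b :: rest) S
      = ((if a ≥ b then a :: (rest ++ [b]) else b :: (rest ++ [a])),
         S ++ [[(PySem.List.pyGet? (if a ≥ b then a :: (rest ++ [b]) else b :: (rest ++ [a])) 0).getD 0,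
                (PySem.List.pyGet? (if a ≥ b then a :: (rest ++ [b]) else b :: (rest ++ [a])) 1).getD 0]]) := rfl
  rw [e1]
  by_cases h : a ≥ b
  · simp only [if_pos h, pg0]
    cases rest <;> simp [pg1]
  · simp only [if_neg h, pg0]
    cases rest <;> simp [pg1]

-- the deque invariant: after r.length rounds with champion c, pending queue r and back-log L,
-- the deque is champion :: back-log ++ losers, and each recorded round pairs the running
-- champion with the next element of the combined queue
theorem pvALoop_eq (r : List Int) : ∀ (c : Int) (L : List Int) (S : List (List Int)),
    pvALoop r.length (c :: (r ++ L), S)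
      = (pvChamp c r :: (L ++ pvLosers c r),
         S ++ List.zipWith (fun a b => [a, b]) (pvChamps c r) (r.drop 1 ++ L ++ pvLosers c r)) := by
  induction r with
  | nil => intro c L S; simp [pvALoop, pvChamp, pvLosers, pvChamps]
  | cons x r ih =>
    intro c L S
    have hstep : pvALoop (x :: r).length (c :: ((x :: r) ++ L), S)
        = pvALoop r.length (pvAStep (c :: (x :: (r ++ L))) S) := rfl
    rw [hstep, pvAStep_cons]
    by_cases h : c ≥ x
    · have hx : ¬ (x > c) := by omega
      simp only [if_pos h]
      have hd : (r ++ L) ++ [x] = r ++ (L ++ [x]) := by simp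
      rw [hd, ih c (L ++ [x]) (S ++ [[c, (r ++ (L ++ [x])).headD 0]])]
      simp only [pvChamp, pvLosers, pvChamps, if_neg hx]
      refine Prod.ext ?_ ?_
      · simp
      · cases r with
        | nil => simp [pvChamps]; cases L <;> simp
        | cons y r' => simp [pvChamps]
    · have hx : x > c := by omega
      simp only [if_neg h]
      have hd : (r ++ L) ++ [c] = r ++ (L ++ [c]) := by simp
      rw [hd, ih x (L ++ [c]) (S ++ [[x, (r ++ (L ++ [c])).headD 0]])]
      simp only [pvChamp, pvLosers, pvChamps, if_pos hx]
      refine Prod.ext ?_ ?_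
      · simp
      · cases r with
        | nil => simp [pvChamps]; cases L <;> simp
        | cons y r' => simp [pvChamps]

-- zipWith only consumes as much of the second list as the first allows
theorem pv_zipWith_take {α β γ : Type} (f : α → β → γ) (xs : List α) :
    ∀ ys : List β, List.zipWith f xs (ys.take xs.length) = List.zipWith f xs ys := by
  induction xs with
  | nil => intro ys; simp
  | cons x xs ih => intro ys; cases ys <;> simp [ih]

-- only the first loser is ever read as a recorded second element
theorem pv_seconds_take (f : Int → Int → List Int) (t Cs Ls : List Int)
    (hC : Cs.length = t.length) (hL : t.length ≤ Ls.length) :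
    List.zipWith f Cs (t.drop 1 ++ Ls) = List.zipWith f Cs (t.drop 1 ++ Ls.take 1) := by
  cases t with
  | nil =>
    have : Cs = [] := List.eq_nil_of_length_eq_zero hC
    simp [this]
  | cons y t' =>
    simp only [List.drop_succ_cons, List.drop_zero]
    rw [← pv_zipWith_take f Cs (t' ++ Ls)]
    rw [← pv_zipWith_take f Cs (t' ++ Ls.take 1)]
    congr 1
    rw [List.take_append, List.take_append]
    simp only [List.length_cons] at hC hL
    have h1 : t'.take Cs.length = t' := List.take_of_length_le (by omega)
    rw [h1]
    congr 1
    rw [List.take_take]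
    congr 1
    omega

-- ===== VERDICT (by name: the statement is the Claim_ definition above) =====
theorem getQueryResults_spec : Claim_equal_getQueryResults := by
  intro e q _ hpre
  unfold Spec_getQueryResults
  obtain ⟨hne, -⟩ := hpre
  cases e with
  | nil => exact absurd rfl hne
  | cons e0 t =>
    have hlen : ((((e0 :: t).length : Nat) : Int) - 1).toNat = t.length := by simp
    have hA : pvALoop ((((e0 :: t).length : Nat) : Int) - 1).toNat (e0 :: t, [])
        = (pvChamp e0 t :: pvLosers e0 t,
           List.zipWith (fun a b => [a, b]) (pvChamps e0 t) (t.drop 1 ++ pvLosers e0 t)) := by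
      rw [hlen]
      have h0 := pvALoop_eq t e0 [] []
      simpa using h0
    have hslice1 : PySem.List.slice (e0 :: t) (some 1) none = t := by
      rw [PySem.List.slice_from_one]; rfl
    have hfold : t.foldl pvBStep (e0, ([] : List Int), ([] : List Int))
        = (pvChamp e0 t, pvLosers e0 t, pvChamps e0 t) := by
      rw [pvBStep_fold]; simp
    have hcycle : PySem.List.slice (pvChamp e0 t :: pvLosers e0 t) (some 1) none = pvLosers e0 t := by
      rw [PySem.List.slice_from_one]; rfl
    have hslice2 : PySem.List.slice (e0 :: t) (some 2) none = t.drop 1 := by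
      simp [pysem]
    have hslicetake : PySem.List.slice (pvLosers e0 t) none (some 1) = (pvLosers e0 t).take 1 := by
      simp [pysem]
    have hsec : List.zipWith (fun a b => [a, b]) (pvChamps e0 t) (t.drop 1 ++ pvLosers e0 t)
        = List.zipWith (fun a b => [a, b]) (pvChamps e0 t) (t.drop 1 ++ (pvLosers e0 t).take 1) := by
      exact pv_seconds_take _ t _ _ (pvChamps_length t e0) (by rw [pvLosers_length])
    simp only [getQueryResults, getQueryResults_alt, hA, hslice1, hfold, pg0, hcycle,
      hslice2, hslicetake, hsec]
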